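-- pv_equiv track=rewrite | github.com/xmd79/trading-bot-using-time-series | hftautox9.py | detect_reversals
-- ===== SOURCE A (Python) =====
-- def detect_reversals(close):
--     """
--     Detect peaks and troughs in the close prices to identify reversals.
--
--     Parameters:
--         close (list): List of close prices.
--
--     Returns:
--         list: List of detected reversals (peaks and dips).
--     """
--     reversals = []
--     for i in range(1, len(close) - 1):
--         if close[i] > close[i - 1] and close[i] > close[i + 1]:
--             reversals.append("peak")  # Peak
--         elif close[i] < close[i - 1] and close[i] < close[i + 1]:
--             reversals.append("dip")  # Dip
--     return reversals
-- ===== SOURCE B (Python) =====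
-- def detect_reversals(close):
--     """Run-length approach: compress the slope-sign sequence into run keys;
--     each boundary between a rising run and a falling run is one reversal
--     ('peak' for + to -, 'dip' for - to +)."""
--     def sgn(x):
--         return (x > 0) - (x < 0)
--     signs = [sgn(b - a) for a, b in zip(close, close[1:])]
--     keys = []
--     for s in signs:
--         if not keys or keys[-1] != s:
--             keys.append(s)
--     return ["peak" if a > 0 else "dip"
--             for a, b in zip(keys, keys[1:])
--             if (a > 0 and b < 0) or (a < 0 and b > 0)]
-- ===== Notes on version B (the rewrite author's own statement) =====
-- stated objective: alternative
-- what changed: B run-length-encodes the slope-sign sequence into run keys and emits exactly one reversal per rising/falling run boundary, instead of A's per-index triple comparisons over the price list.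
import Mathlib
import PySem

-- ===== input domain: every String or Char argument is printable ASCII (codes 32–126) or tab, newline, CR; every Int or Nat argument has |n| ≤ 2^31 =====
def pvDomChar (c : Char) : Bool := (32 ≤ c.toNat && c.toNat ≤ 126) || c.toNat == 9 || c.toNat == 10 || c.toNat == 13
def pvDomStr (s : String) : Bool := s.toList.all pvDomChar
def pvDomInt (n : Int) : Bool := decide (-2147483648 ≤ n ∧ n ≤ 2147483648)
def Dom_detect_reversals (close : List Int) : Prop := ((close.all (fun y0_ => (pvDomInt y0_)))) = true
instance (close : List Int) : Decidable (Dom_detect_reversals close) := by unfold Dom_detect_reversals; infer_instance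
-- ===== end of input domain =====

-- B run-length-encodes the slope-sign sequence and emits one reversal per +/- run boundary (alternative algorithm, same cost); return values proven equal.

-- ===== PORT A =====
-- for i in range(1, len(close)-1): compare close[i] with close[i-1] and close[i+1]
def detect_reversals (close : List Int) : List String :=
  (PySem.List.pyRange 1 ((close.length : Int) - 1) 1).foldl
    (fun reversals i =>
      if PySem.List.pyGetD close i 0 > PySem.List.pyGetD close (i - 1) 0 ∧
         PySem.List.pyGetD close i 0 > PySem.List.pyGetD close (i + 1) 0 then
        reversals ++ ["peak"]
      else if PySem.List.pyGetD close i 0 < PySem.List.pyGetD close (i - 1) 0 ∧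
              PySem.List.pyGetD close i 0 < PySem.List.pyGetD close (i + 1) 0 then
        reversals ++ ["dip"]
      else reversals) []

-- ===== PORT B =====
-- sgn(x) = (x > 0) - (x < 0)
def pvSgnB (x : Int) : Int := (if x > 0 then (1 : Int) else 0) - (if x < 0 then 1 else 0)

-- signs = [sgn(b-a) for a,b in zip(close, close[1:])]; compress into run keys;
-- one "peak"/"dip" per +/- run boundary
def detect_reversals_alt (close : List Int) : List String :=
  let signs := (close.zip close.tail).map (fun ab => pvSgnB (ab.2 - ab.1))
  let keys := signs.foldl
    (fun keys s => if keys = [] ∨ keys.getLast? ≠ some s then keys ++ [s] else keys) []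
  ((keys.zip keys.tail).filter
      (fun p => (p.1 > 0 ∧ p.2 < 0) ∨ (p.1 < 0 ∧ p.2 > 0))).map
    (fun p => if p.1 > 0 then "peak" else "dip")

-- ===== PRECONDITION & SPEC =====
def Spec_detect_reversals (close : List Int) (out : List String) : Prop := out = detect_reversals_alt close
instance (close : List Int) (out : List String) : Decidable (Spec_detect_reversals close out) := by unfold Spec_detect_reversals; infer_instance

-- ===== CLAIM (what is proved, stated in full; the proofs are below) =====
def Claim_equal_detect_reversals : Prop := ∀ (close : List Int), Dom_detect_reversals close → Spec_detect_reversals close (detect_reversals close)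

-- ===== LEMMAS AND PROOFS =====

-- the list emitted for one interior position b with neighbours a, c
def pvStep (a b c : Int) : List String :=
  if b > a ∧ b > c then ["peak"] else if b < a ∧ b < c then ["dip"] else []

def pvSignD (pq : Int × Int) : List String :=
  if pq.1 > 0 ∧ pq.2 < 0 then ["peak"] else if pq.1 < 0 ∧ pq.2 > 0 then ["dip"] else []

def pvDiffs (close : List Int) : List Int :=
  (close.zip close.tail).map (fun ab => ab.2 - ab.1)

-- reversal list read off the adjacent pairs of a sequence
def pvScan (xs : List Int) : List String :=
  (xs.zip xs.tail).flatMap pvSignD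

-- keep-first run compression (the recursive spec of B's foldl)
def pvGo (prev : Int) : List Int → List Int
  | [] => []
  | b :: l => if b = prev then pvGo prev l else b :: pvGo b l

def pvDedup : List Int → List Int
  | [] => []
  | a :: l => a :: pvGo a l

lemma pvIf (acc : List String) (a b c : Int) :
    (if b > a ∧ b > c then acc ++ ["peak"]
     else if b < a ∧ b < c then acc ++ ["dip"] else acc) = acc ++ pvStep a b c := by
  unfold pvStep; split_ifs <;> simp

-- A as a flatMap over interior positions
lemma pvA_eq (close : List Int) :
    detect_reversals close =
      (List.range (close.length - 2)).flatMap
        (fun k => pvStep (close.getD k 0) (close.getD (k + 1) 0) (close.getD (k + 2) 0)) := by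
  unfold detect_reversals
  refine (PySem.List.foldl_congr_mem _ _
      (fun acc i => acc ++ pvStep (PySem.List.pyGetD close (i - 1) 0)
        (PySem.List.pyGetD close i 0) (PySem.List.pyGetD close (i + 1) 0)) _
      (fun acc i _ => pvIf acc _ _ _)).trans ?_
  rw [PySem.List.foldl_append_eq_flatMap, List.nil_append, PySem.List.pyRange_one,
      List.flatMap_map]
  have hn : ((close.length : Int) - 1 - 1).toNat = close.length - 2 := by omega
  rw [hn]
  congr 1
  funext k
  have h0 : (1 : Int) + (k : Int) - 1 = ((k : Nat) : Int) := by omega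
  have h1 : (1 : Int) + (k : Int) = ((k + 1 : Nat) : Int) := by omega
  have h2 : (1 : Int) + (k : Int) + 1 = ((k + 2 : Nat) : Int) := by omega
  rw [h0, h2, h1, PySem.List.pyGetD_natCast, PySem.List.pyGetD_natCast,
      PySem.List.pyGetD_natCast]

-- the per-index flatMap agrees with the scan of consecutive differences
lemma pvKey (close : List Int) :
    (List.range (close.length - 2)).flatMap
        (fun k => pvStep (close.getD k 0) (close.getD (k + 1) 0) (close.getD (k + 2) 0)) =
      pvScan (pvDiffs close) := by
  induction close with
  | nil => simp [pvScan, pvDiffs]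
  | cons a tl IH =>
    match tl with
    | [] => simp [pvScan, pvDiffs]
    | [b] => simp [pvScan, pvDiffs]
    | b :: c :: rest =>
      have hlen : (a :: b :: c :: rest).length - 2 = rest.length + 1 := by simp
      rw [hlen, List.range_succ_eq_map, List.flatMap_cons, List.flatMap_map]
      have hl : (b :: c :: rest).length - 2 = rest.length := by simp
      have hshift : ∀ k ∈ List.range rest.length,
          pvStep ((a :: b :: c :: rest).getD k.succ 0)
            ((a :: b :: c :: rest).getD (k.succ + 1) 0)
            ((a :: b :: c :: rest).getD (k.succ + 2) 0) =
          pvStep ((b :: c :: rest).getD k 0)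
            ((b :: c :: rest).getD (k + 1) 0) ((b :: c :: rest).getD (k + 2) 0) :=
        fun k _ => rfl
      have hcong := List.flatMap_congr (l := List.range rest.length)
        (f := fun k : Nat => pvStep ((a :: b :: c :: rest).getD k.succ 0)
            ((a :: b :: c :: rest).getD (k.succ + 1) 0)
            ((a :: b :: c :: rest).getD (k.succ + 2) 0))
        (g := fun k : Nat => pvStep ((b :: c :: rest).getD k 0)
            ((b :: c :: rest).getD (k + 1) 0) ((b :: c :: rest).getD (k + 2) 0)) hshift
      rw [hcong, show List.range rest.length = List.range ((b :: c :: rest).length - 2) from by rw [hl], IH]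
      have hp : pvDiffs (a :: b :: c :: rest) = (b - a) :: pvDiffs (b :: c :: rest) := rfl
      have hp2 : pvScan ((b - a) :: pvDiffs (b :: c :: rest)) =
          pvSignD (b - a, c - b) ++ pvScan (pvDiffs (b :: c :: rest)) := rfl
      rw [hp, hp2]
      have g0 : (a :: b :: c :: rest).getD 0 0 = a := rfl
      have g1 : (a :: b :: c :: rest).getD (0 + 1) 0 = b := rfl
      have g2 : (a :: b :: c :: rest).getD (0 + 2) 0 = c := rfl
      rw [g0, g1, g2]
      have hhead : pvStep a b c = pvSignD (b - a, c - b) := by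
        simp only [pvStep, pvSignD]
        split_ifs <;> first | rfl | omega
      rw [hhead]

-- pvSignD only looks at the signs of the pair
lemma pvSignD_sgn (a b : Int) : pvSignD (pvSgnB a, pvSgnB b) = pvSignD (a, b) := by
  simp only [pvSignD, pvSgnB]
  split_ifs <;> first | rfl | omega

lemma pvScan_map_sgn (l : List Int) : pvScan (l.map pvSgnB) = pvScan l := by
  induction l with
  | nil => rfl
  | cons a l IH =>
    cases l with
    | nil => rfl
    | cons b l' =>
      have h1 : pvScan ((a :: b :: l').map pvSgnB) =
          pvSignD (pvSgnB a, pvSgnB b) ++ pvScan ((b :: l').map pvSgnB) := rfl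
      have h2 : pvScan (a :: b :: l') = pvSignD (a, b) ++ pvScan (b :: l') := rfl
      rw [h1, h2, pvSignD_sgn, IH]

-- compressing runs does not change the scan
lemma pvScan_go (l : List Int) : ∀ prev, pvScan (prev :: pvGo prev l) = pvScan (prev :: l) := by
  induction l with
  | nil => intro prev; rfl
  | cons b l IH =>
    intro prev
    by_cases hb : b = prev
    · subst hb
      have h1 : pvGo b (b :: l) = pvGo b l := by simp [pvGo]
      have h2 : pvScan (b :: b :: l) = pvSignD (b, b) ++ pvScan (b :: l) := rfl
      have h3 : pvSignD (b, b) = [] := by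
        simp only [pvSignD]; split_ifs <;> first | rfl | omega
      rw [h1, IH b, h2, h3, List.nil_append]
    · have h1 : pvGo prev (b :: l) = b :: pvGo b l := by simp [pvGo, hb]
      have h2 : pvScan (prev :: b :: pvGo b l) =
          pvSignD (prev, b) ++ pvScan (b :: pvGo b l) := rfl
      have h3 : pvScan (prev :: b :: l) = pvSignD (prev, b) ++ pvScan (b :: l) := rfl
      rw [h1, h2, h3, IH b]

lemma pvScan_dedup (l : List Int) : pvScan (pvDedup l) = pvScan l := by
  cases l with
  | nil => rfl
  | cons a l => exact pvScan_go l a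

-- B's foldl builds exactly pvDedup
lemma pvFold_go (l : List Int) : ∀ (ks : List Int) (prev : Int), ks ≠ [] → ks.getLast? = some prev →
    l.foldl (fun keys s => if keys = [] ∨ keys.getLast? ≠ some s then keys ++ [s] else keys) ks
      = ks ++ pvGo prev l := by
  induction l with
  | nil => intro ks prev _ _; simp [pvGo]
  | cons s l IH =>
    intro ks prev hne hlast
    simp only [List.foldl_cons]
    by_cases hs : s = prev
    · subst hs
      have hcond : ¬ (ks = [] ∨ ks.getLast? ≠ some s) := by
        intro h; rcases h with h | h
        · exact hne h
        · exact h hlast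
      rw [if_neg hcond, IH ks s hne hlast]
      simp [pvGo]
    · have hcond : (ks = [] ∨ ks.getLast? ≠ some s) := by
        right; rw [hlast]; intro h; exact hs (Option.some.inj h).symm
      rw [if_pos hcond, IH (ks ++ [s]) s (by simp) (by simp)]
      simp [pvGo, hs]

lemma pvFold_eq_dedup (l : List Int) :
    l.foldl (fun keys s => if keys = [] ∨ keys.getLast? ≠ some s then keys ++ [s] else keys) []
      = pvDedup l := by
  cases l with
  | nil => rfl
  | cons s l =>
    have h1 : (if ([] : List Int) = [] ∨ ([] : List Int).getLast? ≠ some s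
        then ([] : List Int) ++ [s] else []) = [s] := by simp
    rw [List.foldl_cons, h1, pvFold_go l [s] s (by simp) (by simp)]
    rfl

-- B's filter-then-map over adjacent key pairs is the scan
lemma pvFilterMap (ps : List (Int × Int)) :
    (ps.filter (fun p => (p.1 > 0 ∧ p.2 < 0) ∨ (p.1 < 0 ∧ p.2 > 0))).map
        (fun p => if p.1 > 0 then "peak" else "dip")
      = ps.flatMap pvSignD := by
  induction ps with
  | nil => rfl
  | cons p ps IH =>
    rw [List.flatMap_cons, ← IH, List.filter_cons]
    by_cases h : (p.1 > 0 ∧ p.2 < 0) ∨ (p.1 < 0 ∧ p.2 > 0)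
    · rw [if_pos (by exact decide_eq_true h), List.map_cons]
      have : pvSignD p = [if p.1 > 0 then "peak" else "dip"] := by
        simp only [pvSignD]; rcases h with h | h
        · rw [if_pos h, if_pos h.1]
        · rw [if_neg (by omega), if_pos h, if_neg (by omega)]
      rw [this]; rfl
    · rw [if_neg (by simpa using h)]
      have : pvSignD p = [] := by
        simp only [pvSignD]
        rw [if_neg (by omega), if_neg (by omega)]
      rw [this, List.nil_append]

lemma pvB_eq (close : List Int) : detect_reversals_alt close = pvScan (pvDiffs close) := by
  unfold detect_reversals_alt
  simp only [pvFold_eq_dedup, pvFilterMap]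
  have hm : (close.zip close.tail).map (fun ab => pvSgnB (ab.2 - ab.1)) =
      (pvDiffs close).map pvSgnB := by
    rw [pvDiffs, List.map_map]; rfl
  rw [hm]
  show pvScan (pvDedup ((pvDiffs close).map pvSgnB)) = pvScan (pvDiffs close)
  rw [pvScan_dedup, pvScan_map_sgn]

-- ===== VERDICT (by name: the statement is the Claim_ definition above) =====
theorem detect_reversals_spec : Claim_equal_detect_reversals := by
  intro close _
  unfold Spec_detect_reversals
  rw [pvA_eq, pvKey, ← pvB_eq]
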